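-- pv_equiv track=rewrite | github.com/catanadj/taskwarrior-nautical | nautical_backfill_chainid.py | _resolve_prev_within_chain
-- ===== SOURCE A (Python) =====
-- def short_uuid(u):
--     u = (u or "").strip().lower()
--     return u.split("-")[0] if u else ""
--
-- def _resolve_prev_within_chain(task, cmap):
--     """
--     Resolve task.prevLink to a full UUID **within the same chain** (cmap),
--     handling short-UUID ambiguity by adjacency.
--     """
--     cur_u = (task.get("uuid") or "").strip().lower()
--     cur_short = short_uuid(cur_u)
--     prev_tok = (task.get("prevLink") or "").strip().lower()
--     if not prev_tok:
--         return None
--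
--     # candidates: any task in chain whose short == prev_tok
--     cands = [u for u in cmap.keys() if short_uuid(u) == prev_tok]
--     if not cands:
--         return None
--     if len(cands) == 1:
--         return cands[0]
--
--     # ambiguous: pick the one whose nextLink points back to us (adjacency)
--     for u in cands:
--         if (cmap[u].get("nextLink") or "").strip().lower() == cur_short:
--             return u
--     return None  # still ambiguous -> treat as no-prev inside chain
-- ===== SOURCE B (Python) =====
-- def short_uuid(u):
--     u = (u or "").strip().lower()
--     return u.split("-")[0] if u else ""
--
-- def _resolve_prev_within_chain(task, cmap):
--     prev_tok = (task.get("prevLink") or "").strip().lower()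
--     if not prev_tok:
--         return None
--     cur_short = short_uuid((task.get("uuid") or "").strip().lower())
--
--     def is_cand(u):
--         return short_uuid(u) == prev_tok
--
--     def is_adj(u):
--         return (cmap[u].get("nextLink") or "").strip().lower() == cur_short
--
--     it = iter(cmap)
--     first = next((u for u in it if is_cand(u)), None)
--     if first is None:
--         return None
--     second = next((u for u in it if is_cand(u)), None)
--     if second is None:
--         return first
--     # ambiguous: adjacency decides, in key order (first, second, then the rest of it)
--     if is_adj(first):
--         return first
--     if is_adj(second):
--         return second
--     return next((u for u in it if is_cand(u) and is_adj(u)), None)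
-- ===== Notes on version B (the rewrite author's own statement) =====
-- stated objective: alternative
-- what changed: B replaces A's build-the-candidate-list-then-loop structure by an early-terminating iterator scan: it finds the first candidate, checks whether a second exists, returns the lone one immediately, and otherwise resolves ambiguity by testing adjacency on first, second, then the remaining keys of the shared iterator.
import Mathlib
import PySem

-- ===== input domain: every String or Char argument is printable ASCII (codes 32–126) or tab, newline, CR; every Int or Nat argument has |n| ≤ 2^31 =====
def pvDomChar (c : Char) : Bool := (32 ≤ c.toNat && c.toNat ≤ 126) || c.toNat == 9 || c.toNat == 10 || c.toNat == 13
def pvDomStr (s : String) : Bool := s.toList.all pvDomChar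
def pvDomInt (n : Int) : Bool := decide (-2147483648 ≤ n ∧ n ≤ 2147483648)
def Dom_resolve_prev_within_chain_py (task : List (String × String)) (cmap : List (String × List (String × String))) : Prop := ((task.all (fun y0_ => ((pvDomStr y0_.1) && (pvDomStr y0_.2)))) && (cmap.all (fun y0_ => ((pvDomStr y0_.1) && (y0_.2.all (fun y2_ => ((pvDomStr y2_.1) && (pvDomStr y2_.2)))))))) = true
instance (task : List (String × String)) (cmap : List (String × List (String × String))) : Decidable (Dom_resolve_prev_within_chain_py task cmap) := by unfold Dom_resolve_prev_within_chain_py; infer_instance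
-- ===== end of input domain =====

-- B replaces A's candidate-list-then-second-loop structure by an early-terminating scan
-- (first candidate / second candidate / adjacency on the rest): objective 'alternative'.

-- ===== PORT A =====
-- dict lookup: first match in the association list (Python dict has unique keys)
def pvDget {α : Type} (d : List (String × α)) (k : String) : Option α :=
  (d.find? (fun kv => kv.1 == k)).map Prod.snd

-- (x or "").strip().lower()
def pvStrlow (s : String) : String := PySem.Str.lower (PySem.Str.strip s)

-- short_uuid(u): strip/lower, then first '-' component if nonempty
def shortUuid (u : String) : String :=
  let u := pvStrlow u
  if u ≠ "" then ((PySem.Str.split? u "-").getD []).headD "" else ""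

def resolve_prev_within_chain_py (task : List (String × String)) (cmap : List (String × List (String × String))) : Option String :=
  let cur_u := pvStrlow ((pvDget task "uuid").getD "")
  let cur_short := shortUuid cur_u
  let prev_tok := pvStrlow ((pvDget task "prevLink").getD "")
  if prev_tok = "" then none
  else
    let cands := (cmap.map Prod.fst).filter (fun u => shortUuid u == prev_tok)
    if cands = [] then none
    else if cands.length = 1 then cands.head?   -- cands[0]; cands ≠ [] in this branch
    else cands.find? (fun u =>
      pvStrlow ((pvDget ((pvDget cmap u).getD []) "nextLink").getD "") == cur_short)

-- ===== PORT B =====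
-- next((u for u in it if p u), None): first element satisfying p, plus the iterator's rest
def pvNextCand (p : String → Bool) : List String → Option (String × List String)
  | [] => none
  | u :: rest => if p u then some (u, rest) else pvNextCand p rest

def resolve_prev_within_chain_py_alt (task : List (String × String)) (cmap : List (String × List (String × String))) : Option String :=
  let prev_tok := pvStrlow ((pvDget task "prevLink").getD "")
  if prev_tok = "" then none
  else
    let cur_short := shortUuid (pvStrlow ((pvDget task "uuid").getD ""))
    let is_cand := fun u => shortUuid u == prev_tok
    let is_adj := fun u =>
      pvStrlow ((pvDget ((pvDget cmap u).getD []) "nextLink").getD "") == cur_short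
    match pvNextCand is_cand (cmap.map Prod.fst) with
    | none => none
    | some (first, it1) =>
      match pvNextCand is_cand it1 with
      | none => some first
      | some (second, it2) =>
        if is_adj first then some first
        else if is_adj second then some second
        else pvNextCand (fun u => is_cand u && is_adj u) it2 |>.map Prod.fst

-- ===== PRECONDITION & SPEC =====
def Spec_resolve_prev_within_chain_py (task : List (String × String)) (cmap : List (String × List (String × String))) (out : Option String) : Prop := out = resolve_prev_within_chain_py_alt task cmap
instance (task : List (String × String)) (cmap : List (String × List (String × String))) (out : Option String) : Decidable (Spec_resolve_prev_within_chain_py task cmap out) := by unfold Spec_resolve_prev_within_chain_py; infer_instance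

-- ===== CLAIM (what is proved, stated in full; the proofs are below) =====
def Claim_equal_resolve_prev_within_chain_py : Prop := ∀ (task : List (String × String)) (cmap : List (String × List (String × String))), Dom_resolve_prev_within_chain_py task cmap → Spec_resolve_prev_within_chain_py task cmap (resolve_prev_within_chain_py task cmap)

-- ===== LEMMAS AND PROOFS =====

-- pvNextCand characterises the filtered list's head and tail-filter
theorem nextCand_char (p : String → Bool) (l : List String) :
    (pvNextCand p l = none → l.filter p = []) ∧
    (∀ u rest, pvNextCand p l = some (u, rest) → l.filter p = u :: rest.filter p) := by
  induction l with
  | nil => simp [pvNextCand]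
  | cons x xs ih =>
    by_cases hp : p x
    · constructor
      · simp [pvNextCand, hp]
      · intro u rest h
        simp only [pvNextCand, hp, if_pos, Option.some.injEq, Prod.mk.injEq] at h
        obtain ⟨rfl, rfl⟩ := h
        simp [List.filter_cons_of_pos hp]
    · simpa [pvNextCand, hp, List.filter_cons_of_neg (by simpa using hp)] using ih

-- find? on a filtered list = find? of the conjunction
theorem find?_filter_and (p q : String → Bool) (l : List String) :
    (l.filter p).find? q = l.find? (fun u => p u && q u) := by
  induction l with
  | nil => rfl
  | cons x xs ih =>
    by_cases hp : p x
    · by_cases hq : q x <;>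
        simp [List.filter_cons_of_pos hp, hp, hq, ih]
    · simp [List.filter_cons_of_neg (by simpa using hp), hp, ih]

-- the first element a pvNextCand scan yields is find?
theorem nextCand_fst (p : String → Bool) (l : List String) :
    (pvNextCand p l).map Prod.fst = l.find? p := by
  induction l with
  | nil => rfl
  | cons x xs ih => by_cases hp : p x <;> simp [pvNextCand, hp, ih]

-- ===== VERDICT (by name: the statement is the Claim_ definition above) =====
theorem resolve_prev_within_chain_py_spec : Claim_equal_resolve_prev_within_chain_py := by
  intro task cmap _
  unfold Spec_resolve_prev_within_chain_py resolve_prev_within_chain_py resolve_prev_within_chain_py_alt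
  simp only []
  set prev_tok := pvStrlow ((pvDget task "prevLink").getD "") with hprev
  by_cases h0 : prev_tok = ""
  · simp [h0]
  · simp only [h0, if_false]
    set cur_short := shortUuid (pvStrlow ((pvDget task "uuid").getD "")) with hcs
    set p := fun u => shortUuid u == prev_tok with hp
    set q := fun u =>
      pvStrlow ((pvDget ((pvDget cmap u).getD []) "nextLink").getD "") == cur_short with hq
    set keys := cmap.map Prod.fst with hk
    cases h1 : pvNextCand p keys with
    | none =>
      have := (nextCand_char p keys).1 h1
      simp [this]
    | some fr =>
      obtain ⟨first, it1⟩ := fr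
      have hf1 : keys.filter p = first :: it1.filter p := (nextCand_char p keys).2 _ _ h1
      cases h2 : pvNextCand p it1 with
      | none =>
        have hf2 : it1.filter p = [] := (nextCand_char p it1).1 h2
        simp [hf1, hf2, h2]
      | some sr =>
        obtain ⟨second, it2⟩ := sr
        have hf2 : it1.filter p = second :: it2.filter p := (nextCand_char p it1).2 _ _ h2
        simp only [hf1, hf2, h2]
        by_cases ha1 : q first
        · have h1' : pvStrlow ((pvDget ((pvDget cmap first).getD []) "nextLink").getD "") = cur_short := by
            simpa [hq] using ha1
          simp [ha1, h1']
        · have h1' : ¬ (pvStrlow ((pvDget ((pvDget cmap first).getD []) "nextLink").getD "") = cur_short) := by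
            simpa [hq] using ha1
          by_cases ha2 : q second
          · have h2' : pvStrlow ((pvDget ((pvDget cmap second).getD []) "nextLink").getD "") = cur_short := by
              simpa [hq] using ha2
            simp [ha1, ha2, h1', h2']
          · rw [List.find?_cons_of_neg (by simpa using ha1),
                List.find?_cons_of_neg (by simpa using ha2),
                if_neg (by simp), if_neg (by simp), if_neg ha1, if_neg ha2,
                find?_filter_and p q it2]
            exact (nextCand_fst _ it2).symm
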